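-- pv_equiv track=rewrite | github.com/batetopro/algorithms | codewars/4/simple_maze.py | prepare_bfs_matrix
-- ===== SOURCE A (Python) =====
-- def prepare_bfs_matrix(maze):
--     width = max([len(row) for row in maze])
--     matrix = []
--     start = None
--
--     for i, row in enumerate(maze):
--         matrix.append([0] * width)
--         for j, char in enumerate(row):
--             if char == 'k':
--                 if start is None:
--                     matrix[i][j] = 0
--                     start = (i, j)
--                 else:
--                     raise ValueError("Multiple start positions.")
--             elif char == '#':
--                 matrix[i][j] = -1
--             else:
--                 matrix[i][j] = 0
--
--     if start is None:
--         raise ValueError("Start position could not be found.")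
--     return matrix, start
-- ===== SOURCE B (Python) =====
-- def prepare_bfs_matrix(maze):
--     width = max([len(row) for row in maze])
--     matrix = [[-1 if c == '#' else 0 for c in row] + [0] * (width - len(row))
--               for row in maze]
--     starts = [(i, j) for i, row in enumerate(maze) for j, c in enumerate(row) if c == 'k']
--     if len(starts) > 1:
--         raise ValueError("Multiple start positions.")
--     if not starts:
--         raise ValueError("Start position could not be found.")
--     return matrix, starts[0]
-- ===== Notes on version B (the rewrite author's own statement) =====
-- stated objective: simpler
-- what changed: The single fused loop that mutates a preallocated zero row in place and threads a start/duplicate-error state is split into two independent passes: a comprehension that maps each row directly to its cost row (padded), and a separate comprehension collecting all 'k' positions, validated by length.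
-- outside the precondition, e.g. on prepare_bfs_matrix([]): A raises ValueError, B raises ValueError; on prepare_bfs_matrix(['..']): A raises ValueError, B raises ValueError; on prepare_bfs_matrix(['kk']): A raises ValueError, B raises ValueError
import Mathlib
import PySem

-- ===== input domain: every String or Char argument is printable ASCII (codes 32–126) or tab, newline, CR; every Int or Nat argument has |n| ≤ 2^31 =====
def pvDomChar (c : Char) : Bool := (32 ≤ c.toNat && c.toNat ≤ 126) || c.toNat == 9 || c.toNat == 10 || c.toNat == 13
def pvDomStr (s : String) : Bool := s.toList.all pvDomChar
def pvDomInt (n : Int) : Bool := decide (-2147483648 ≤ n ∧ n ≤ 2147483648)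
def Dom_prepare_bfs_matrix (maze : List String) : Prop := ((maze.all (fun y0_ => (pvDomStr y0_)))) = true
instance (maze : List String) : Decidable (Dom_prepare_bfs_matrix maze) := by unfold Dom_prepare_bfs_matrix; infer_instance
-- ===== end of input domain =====

-- B replaces A's single fused loop (in-place row mutation + threaded start/duplicate state) by two
-- independent passes: a direct row-to-cost-row comprehension and a separate pass collecting 'k'
-- positions (objective: simpler). Both raise (ValueError) on empty mazes and mazes whose 'k'-count
-- is not exactly 1; those inputs are outside Pre_.

-- ===== PORT A =====
-- inner loop body: "for j, char in enumerate(row): …"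
def pvAstep (i : Int) (acc : List Int × Option (Int × Int)) (jc : Int × Char) :
    List Int × Option (Int × Int) :=
  if jc.2 = 'k' then
    match acc.2 with
    | none => (acc.1.set jc.1.toNat 0, some (i, jc.1))
    | some s => (acc.1, some s)  -- Python: raise ValueError("Multiple start positions."); excluded by Pre_
  else if jc.2 = '#' then (acc.1.set jc.1.toNat (-1), acc.2)
  else (acc.1.set jc.1.toNat 0, acc.2)

-- outer loop body: "matrix.append([0] * width); for j, char in …"
def pvArow (w : Nat) (acc : List (List Int) × Option (Int × Int)) (ir : Int × String) :
    List (List Int) × Option (Int × Int) :=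
  let st := (PySem.List.enumerate ir.2.toList 0).foldl (pvAstep ir.1) (List.replicate w 0, acc.2)
  (acc.1 ++ [st.1], st.2)

def prepare_bfs_matrix (maze : List String) : List (List Int) × (Int × Int) :=
  -- width = max([len(row) for row in maze]); max([]) raises ValueError, excluded by Pre_
  let width : Int := (PySem.List.max? (maze.map (fun row => PySem.Str.len row)) (fun x => x)).getD 0
  let res := (PySem.List.enumerate maze 0).foldl (pvArow width.toNat) ([], none)
  -- res.2 = none: Python raises ValueError("Start position could not be found."); excluded by Pre_
  (res.1, res.2.getD (0, 0))

-- ===== PORT B =====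
def prepare_bfs_matrix_alt (maze : List String) : List (List Int) × (Int × Int) :=
  -- width = max([len(row) for row in maze]); max([]) raises ValueError, excluded by Pre_
  let width : Int := (PySem.List.max? (maze.map (fun row => PySem.Str.len row)) (fun x => x)).getD 0
  let matrix := maze.map (fun row =>
    row.toList.map (fun c => if c = '#' then (-1 : Int) else 0)
      ++ List.replicate (width - PySem.Str.len row).toNat 0)
  let starts := (PySem.List.enumerate maze 0).flatMap (fun ir =>
    (PySem.List.enumerate ir.2.toList 0).filterMap (fun jc =>
      if jc.2 = 'k' then some (ir.1, jc.1) else none))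
  -- len(starts) > 1 or starts == []: Python raises ValueError; excluded by Pre_
  (matrix, starts.headD (0, 0))

-- ===== PRECONDITION & SPEC =====
-- Pre_ excludes exactly the inputs where BOTH programs raise ValueError: the empty maze
-- (max([]) raises) and mazes without exactly one 'k' (start-position errors).
def Pre_prepare_bfs_matrix (maze : List String) : Prop :=
  maze ≠ [] ∧ (maze.map (fun r => r.toList.count 'k')).sum = 1
instance (maze : List String) : Decidable (Pre_prepare_bfs_matrix maze) := by
  unfold Pre_prepare_bfs_matrix; infer_instance

def pvWitness_prepare_bfs_matrix : List String := ["#k", ".."]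

def Spec_prepare_bfs_matrix (maze : List String) (out : List (List Int) × (Int × Int)) : Prop := out = prepare_bfs_matrix_alt maze
instance (maze : List String) (out : List (List Int) × (Int × Int)) : Decidable (Spec_prepare_bfs_matrix maze out) := by unfold Spec_prepare_bfs_matrix; infer_instance

-- ===== CLAIM (what is proved, stated in full; the proofs are below) =====
def Claim_equal_prepare_bfs_matrix : Prop := ∀ (maze : List String), Dom_prepare_bfs_matrix maze → Pre_prepare_bfs_matrix maze → Spec_prepare_bfs_matrix maze (prepare_bfs_matrix maze)

-- ===== LEMMAS AND PROOFS =====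

-- the per-character cost value B assigns
def pvF (c : Char) : Int := if c = '#' then -1 else 0

-- overwrite ρ[j], ρ[j+1], … with the elements of xs (what A's in-place assignments do)
def pvSetRange (ρ : List Int) (j : Nat) : List Int → List Int
  | [] => ρ
  | x :: xs => pvSetRange (ρ.set j x) (j + 1) xs

-- the start positions B collects in one row (with row index i, columns numbered from j0)
def pvRowStarts (i : Int) (j0 : Int) (cs : List Char) : List (Int × Int) :=
  (PySem.List.enumerate cs j0).filterMap (fun jc => if jc.2 = 'k' then some (i, jc.1) else none)

lemma pvRowStarts_cons (i j0 : Int) (c : Char) (cs : List Char) :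
    pvRowStarts i j0 (c :: cs) =
      (if c = 'k' then [(i, j0)] else []) ++ pvRowStarts i (j0 + 1) cs := by
  simp only [pvRowStarts, PySem.List.enumerate_cons, List.filterMap_cons]
  split_ifs <;> simp

lemma pvRowStarts_nil_iff (i j0 : Int) (cs : List Char) :
    pvRowStarts i j0 cs = [] ↔ cs.count 'k' = 0 := by
  induction cs generalizing j0 with
  | nil => simp [pvRowStarts]
  | cons c cs ih =>
    rw [pvRowStarts_cons]
    by_cases h : c = 'k' <;> simp [h, ih]
    

-- A's inner loop, characterised: the row becomes a block overwrite with pvF-values, and the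
-- start state becomes s.or (first 'k' of the row) — provided there is no duplicate 'k' to raise on
lemma pvInner (i : Int) (cs : List Char) : ∀ (j0 : Nat) (ρ : List Int) (s : Option (Int × Int)),
    ((s = none ∧ cs.count 'k' ≤ 1) ∨ (s ≠ none ∧ cs.count 'k' = 0)) →
    (PySem.List.enumerate cs (j0 : Int)).foldl (pvAstep i) (ρ, s) =
      (pvSetRange ρ j0 (cs.map pvF), s.or (pvRowStarts i (j0 : Int) cs).head?) := by
  induction cs with
  | nil => intro j0 ρ s _; simp [PySem.List.enumerate, pvRowStarts, pvSetRange]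
  | cons c cs ih =>
    intro j0 ρ s hs
    rw [PySem.List.enumerate_cons, List.foldl_cons, pvRowStarts_cons]
    have hcast : ((j0 : Int) + 1) = ((j0 + 1 : Nat) : Int) := by push_cast; ring
    have hcount : (c :: cs).count 'k' = cs.count 'k' + (if c = 'k' then 1 else 0) := by
      simp [List.count_cons]
    by_cases hk : c = 'k'
    · -- the 'k' branch; s must be none (otherwise the count hypothesis is contradicted)
      rcases hs with ⟨hs, hle⟩ | ⟨hs, h0⟩
      · subst hs
        have hcs : cs.count 'k' = 0 := by rw [hcount] at hle; simp [hk] at hle; omega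
        have hstep : pvAstep i (ρ, (none : Option (Int × Int))) ((j0 : Int), c)
            = (ρ.set j0 0, some (i, (j0 : Int))) := by
          simp [pvAstep, hk]
        rw [hstep, hcast, ih (j0 + 1) (ρ.set j0 0) (some (i, (j0 : Int)))
          (Or.inr ⟨by simp, hcs⟩)]
        have hf : pvF c = 0 := by simp [pvF, hk]
        simp [pvSetRange, hk, pvF]
      · exfalso; rw [hcount] at h0; simp [hk] at h0
    · -- not a start: both '#' and plain cells just write pvF c
      have hstep : pvAstep i (ρ, s) ((j0 : Int), c) = (ρ.set j0 (pvF c), s) := by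
        rcases s with _ | s' <;> by_cases hh : c = '#' <;> simp [pvAstep, pvF, hk, hh]
      have hs' : (s = none ∧ cs.count 'k' ≤ 1) ∨ (s ≠ none ∧ cs.count 'k' = 0) := by
        rw [hcount] at hs; simpa [hk] using hs
      rw [hstep, hcast, ih (j0 + 1) (ρ.set j0 (pvF c)) s hs']
      simp [pvSetRange, hk]

-- pvSetRange on a long-enough suffix is take/overwrite/keep
lemma pvSetRange_append (xs : List Int) : ∀ (pre suf : List Int), xs.length ≤ suf.length →
    pvSetRange (pre ++ suf) pre.length xs = pre ++ xs ++ suf.drop xs.length := by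
  induction xs with
  | nil => intro pre suf _; simp [pvSetRange]
  | cons x xs ih =>
    intro pre suf hlen
    cases suf with
    | nil => simp at hlen
    | cons y suf =>
      have hset : (pre ++ y :: suf).set pre.length x = (pre ++ [x]) ++ suf := by
        rw [List.set_append_right _ _ (le_refl _)]
        simp
      rw [pvSetRange, hset]
      have : pre.length + 1 = (pre ++ [x]).length := by simp
      rw [this, ih (pre ++ [x]) suf (by simpa using hlen)]
      simp

-- the row B produces, at matrix width w
def pvBRow (w : Nat) (r : String) : List Int :=
  r.toList.map pvF ++ List.replicate (w - r.toList.length) 0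

def pvTotalK (rows : List String) : Nat := (rows.map (fun r => r.toList.count 'k')).sum

-- A's outer loop, characterised in B's shape
lemma pvOuter (w : Nat) (rows : List String) : ∀ (i0 : Nat) (acc : List (List Int))
    (s : Option (Int × Int)), (∀ r ∈ rows, r.toList.length ≤ w) →
    ((s = none ∧ pvTotalK rows ≤ 1) ∨ (s ≠ none ∧ pvTotalK rows = 0)) →
    (PySem.List.enumerate rows (i0 : Int)).foldl (pvArow w) (acc, s) =
      (acc ++ rows.map (pvBRow w),
       s.or ((PySem.List.enumerate rows (i0 : Int)).flatMap
         (fun ir => pvRowStarts ir.1 0 ir.2.toList)).head?) := by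
  induction rows with
  | nil => intro i0 acc s _ _; simp [PySem.List.enumerate]
  | cons r rows ih =>
    intro i0 acc s hw hs
    rw [PySem.List.enumerate_cons, List.foldl_cons]
    have htot : pvTotalK (r :: rows) = r.toList.count 'k' + pvTotalK rows := by
      simp [pvTotalK]
    have hsin : ((s = none ∧ r.toList.count 'k' ≤ 1) ∨ (s ≠ none ∧ r.toList.count 'k' = 0)) := by
      rcases hs with ⟨h1, h2⟩ | ⟨h1, h2⟩
      · exact Or.inl ⟨h1, by omega⟩
      · exact Or.inr ⟨h1, by omega⟩
    have hrow : pvArow w (acc, s) ((i0 : Int), r) =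
        (acc ++ [pvBRow w r], s.or (pvRowStarts (i0 : Int) 0 r.toList).head?) := by
      unfold pvArow
      dsimp only
      have hin := pvInner (i0 : Int) r.toList 0 (List.replicate w 0) s hsin
      simp only [Nat.cast_zero] at hin
      rw [hin]
      have hsr : pvSetRange (List.replicate w 0) 0 (r.toList.map pvF) = pvBRow w r := by
        have := pvSetRange_append (r.toList.map pvF) [] (List.replicate w 0)
          (by simpa using hw r (by simp))
        simpa [pvBRow, List.drop_replicate] using this
      simp [hsr]
    rw [hrow]
    have hcast : ((i0 : Int) + 1) = ((i0 + 1 : Nat) : Int) := by push_cast; ring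
    have hs' : ((s.or (pvRowStarts (i0 : Int) 0 r.toList).head? = none ∧ pvTotalK rows ≤ 1) ∨
        (s.or (pvRowStarts (i0 : Int) 0 r.toList).head? ≠ none ∧ pvTotalK rows = 0)) := by
      rcases hs with ⟨h1, h2⟩ | ⟨h1, h2⟩
      · subst h1
        by_cases hz : r.toList.count 'k' = 0
        · left
          constructor
          · have : pvRowStarts (i0 : Int) 0 r.toList = [] :=
              (pvRowStarts_nil_iff _ _ _).mpr hz
            simp [this]
          · omega
        · right
          constructor
          · have : pvRowStarts (i0 : Int) 0 r.toList ≠ [] := by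
              intro h; exact hz ((pvRowStarts_nil_iff _ _ _).mp h)
            rcases List.exists_cons_of_ne_nil this with ⟨a, l, hl⟩
            simp [hl]
          · omega
      · right
        refine ⟨?_, by omega⟩
        rcases s with _ | v
        · simp at h1
        · simp
    rw [hcast, ih (i0 + 1) (acc ++ [pvBRow w r])
      (s.or (pvRowStarts (i0 : Int) 0 r.toList).head?) (fun x hx => hw x (by simp [hx])) hs']
    rw [← hcast]
    simp [List.head?_append, Option.or_assoc]

-- ===== VERDICT (by name: the statement is the Claim_ definition above) =====
theorem prepare_bfs_matrix_spec : Claim_equal_prepare_bfs_matrix := by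
  intro maze _ hpre
  obtain ⟨hne, hcnt⟩ := hpre
  unfold Spec_prepare_bfs_matrix prepare_bfs_matrix prepare_bfs_matrix_alt
  have hmax : ∃ m, PySem.List.max? (maze.map (fun row => PySem.Str.len row)) (fun x => x)
      = some m := by
    rcases h : PySem.List.max? (maze.map (fun row => PySem.Str.len row)) (fun x => x) with _ | m
    · rw [PySem.List.max?_eq_none_iff] at h
      simp [hne] at h
    · exact ⟨m, rfl⟩
  obtain ⟨m, hm⟩ := hmax
  have hmem := PySem.List.max?_mem hm
  have hismax := PySem.List.max?_isMax hm
  have hm0 : 0 ≤ m := by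
    rcases List.mem_map.mp hmem with ⟨r0, _, hr0⟩
    rw [← hr0, PySem.Str.len_eq]; positivity
  have hwle : ∀ r ∈ maze, r.toList.length ≤ m.toNat := by
    intro r hr
    have := hismax (PySem.Str.len r) (List.mem_map.mpr ⟨r, hr, rfl⟩)
    rw [PySem.Str.len_eq] at this
    omega
  have houter := pvOuter m.toNat maze 0 [] none hwle
    (Or.inl ⟨rfl, by simp [pvTotalK, hcnt]⟩)
  simp only [Nat.cast_zero] at houter
  rw [hm]
  simp only [Option.getD_some]
  rw [houter]
  have hrows : maze.map (pvBRow m.toNat) = maze.map (fun row =>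
      row.toList.map (fun c => if c = '#' then (-1 : Int) else 0)
        ++ List.replicate (m - PySem.Str.len row).toNat 0) := by
    apply List.map_congr_left
    intro r hr
    simp [pvBRow, pvF]
  rw [hrows]
  have hstarts : ((PySem.List.enumerate maze 0).flatMap
        (fun ir => pvRowStarts ir.1 0 ir.2.toList)).head?
      = ((PySem.List.enumerate maze 0).flatMap (fun ir =>
        (PySem.List.enumerate ir.2.toList 0).filterMap (fun jc =>
          if jc.2 = 'k' then some (ir.1, jc.1) else none))).head? := by
    simp [pvRowStarts]
  rw [Option.none_or, hstarts]
  congr 1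
  generalize ((PySem.List.enumerate maze 0).flatMap (fun ir =>
    (PySem.List.enumerate ir.2.toList 0).filterMap (fun jc =>
      if jc.2 = 'k' then some (ir.1, jc.1) else none))) = starts
  cases starts <;> rfl
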